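-- pv_equiv track=rewrite | github.com/sticky-ai/Algorithms | codesignal/arcade/graphs/namingRoads.py | namingRoads
-- ===== SOURCE A (Python) =====
-- from collections import defaultdict as dd
--
-- def namingRoads(roads):
--     c = dd(set)
--
--     for c1, c2, n in roads:
--         c[c1].add(n)
--         c[c2].add(n)
--
--     for v in c.values():
--         for n in v:
--             if n-1 in v or n+1 in v:
--                 return False
--     return True
-- ===== SOURCE B (Python) =====
-- def namingRoads(roads):
--     nums = {}
--     for c1, c2, n in roads:
--         nums.setdefault(c1, []).append(n)
--         nums.setdefault(c2, []).append(n)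
--     for lst in nums.values():
--         s = sorted(lst)
--         for a, b in zip(s, s[1:]):
--             if b - a == 1:
--                 return False
--     return True
-- ===== Notes on version B (the rewrite author's own statement) =====
-- stated objective: alternative
-- what changed: Instead of per-city hash sets probed for n-1/n+1 membership, B groups road numbers into per-city lists, sorts each list and scans adjacent pairs for a difference of exactly 1.
import Mathlib
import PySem

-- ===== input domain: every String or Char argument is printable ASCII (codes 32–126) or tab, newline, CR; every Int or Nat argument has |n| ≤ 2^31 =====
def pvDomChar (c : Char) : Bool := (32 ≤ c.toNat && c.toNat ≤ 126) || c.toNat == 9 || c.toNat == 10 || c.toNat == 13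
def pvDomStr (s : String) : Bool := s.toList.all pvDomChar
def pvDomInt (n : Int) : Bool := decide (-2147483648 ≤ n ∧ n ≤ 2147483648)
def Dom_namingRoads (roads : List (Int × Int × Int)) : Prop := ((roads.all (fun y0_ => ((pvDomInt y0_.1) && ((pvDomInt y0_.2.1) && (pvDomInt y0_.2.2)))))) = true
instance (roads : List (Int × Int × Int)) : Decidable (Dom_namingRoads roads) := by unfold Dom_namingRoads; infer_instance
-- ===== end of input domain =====

-- B groups road numbers into per-city lists, sorts each and scans adjacent pairs for a
-- difference of exactly 1, instead of A's per-city hash sets probed for n-1/n+1 (alternative decomposition).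

-- ===== PORT A =====
-- defaultdict(set): c[c1].add(n) = modify with default empty set.  The inner 'for n in v'
-- iterates a Python set, but the result (an 'any') does not depend on iteration order.
def namingRoads (roads : List (Int × Int × Int)) : Bool :=
  !((roads.foldl
    (fun d r =>
      (d.modify r.1 PySem.Set.empty (fun s => PySem.Set.add s r.2.2)).modify
        r.2.1 PySem.Set.empty (fun s => PySem.Set.add s r.2.2))
    (PySem.Dict.empty : PySem.Dict Int (PySem.Set Int))).values.any (fun v =>
      v.any (fun n => PySem.Set.contains v (n - 1) || PySem.Set.contains v (n + 1))))

-- ===== PORT B =====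
-- nums.setdefault(city, []).append(n) = modify with default [] appending n.
def namingRoads_alt (roads : List (Int × Int × Int)) : Bool :=
  !((roads.foldl
    (fun d r =>
      (d.modify r.1 ([] : List Int) (fun l => l ++ [r.2.2])).modify
        r.2.1 ([] : List Int) (fun l => l ++ [r.2.2]))
    (PySem.Dict.empty : PySem.Dict Int (List Int))).values.any (fun lst =>
      let s := PySem.List.sorted lst (fun x => x) false
      (s.zip (PySem.List.slice s (some 1) none)).any (fun p => p.2 - p.1 == 1)))

-- ===== PRECONDITION & SPEC =====
def Spec_namingRoads (roads : List (Int × Int × Int)) (out : Bool) : Prop := out = namingRoads_alt roads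
instance (roads : List (Int × Int × Int)) (out : Bool) : Decidable (Spec_namingRoads roads out) := by unfold Spec_namingRoads; infer_instance

-- ===== CLAIM (what is proved, stated in full; the proofs are below) =====
def Claim_equal_namingRoads : Prop := ∀ (roads : List (Int × Int × Int)), Dom_namingRoads roads → Spec_namingRoads roads (namingRoads roads)

-- ===== LEMMAS AND PROOFS =====

-- each road contributes its number to both endpoint cities: the flattened (city, number) pairs
def pvPairs (roads : List (Int × Int × Int)) : List (Int × Int) :=
  roads.flatMap (fun r => [(r.1, r.2.2), (r.2.1, r.2.2)])

lemma foldA_eq_pairs (roads : List (Int × Int × Int)) (d : PySem.Dict Int (PySem.Set Int)) :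
    roads.foldl
      (fun d r =>
        (d.modify r.1 PySem.Set.empty (fun s => PySem.Set.add s r.2.2)).modify
          r.2.1 PySem.Set.empty (fun s => PySem.Set.add s r.2.2)) d
    = (pvPairs roads).foldl
        (fun d p => d.modify p.1 PySem.Set.empty (fun s => PySem.Set.add s p.2)) d := by
  induction roads generalizing d with
  | nil => simp [pvPairs]
  | cons r t ih => simp [pvPairs, List.foldl] at *; exact ih _

lemma foldB_eq_pairs (roads : List (Int × Int × Int)) (d : PySem.Dict Int (List Int)) :
    roads.foldl
      (fun d r =>
        (d.modify r.1 ([] : List Int) (fun l => l ++ [r.2.2])).modify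
          r.2.1 ([] : List Int) (fun l => l ++ [r.2.2])) d
    = (pvPairs roads).foldl
        (fun d p => d.modify p.1 ([] : List Int) (fun l => l ++ [p.2])) d := by
  induction roads generalizing d with
  | nil => simp [pvPairs]
  | cons r t ih => simp [pvPairs, List.foldl] at *; exact ih _

-- joint invariant of the two grouping folds: same keys would follow from keys_foldl_modify_key;
-- here: A's set at any city is set(B's list at that city)
lemma getD_fold_rel (pairs : List (Int × Int))
    (dA : PySem.Dict Int (PySem.Set Int)) (dB : PySem.Dict Int (List Int))
    (h : ∀ c, dA.getD c PySem.Set.empty = PySem.Set.ofList (dB.getD c [])) :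
    ∀ c, (pairs.foldl (fun d p => d.modify p.1 PySem.Set.empty (fun s => PySem.Set.add s p.2)) dA).getD c PySem.Set.empty
      = PySem.Set.ofList ((pairs.foldl (fun d p => d.modify p.1 ([] : List Int) (fun l => l ++ [p.2])) dB).getD c []) := by
  induction pairs generalizing dA dB with
  | nil => exact h
  | cons p t ih =>
    refine ih _ _ (fun c => ?_)
    by_cases hc : c = p.1
    · subst hc
      rw [PySem.Dict.getD_modify_self, PySem.Dict.getD_modify_self,
        PySem.Set.ofList_append_singleton, h]
    · rw [PySem.Dict.getD_modify_of_ne _ _ _ hc, PySem.Dict.getD_modify_of_ne _ _ _ hc]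
      exact h c

-- sorted-adjacent-difference-1 scan ↔ two consecutive numbers are present
def pvHasAdj (s : List Int) : Bool := (s.zip s.tail).any (fun p => p.2 - p.1 == 1)

lemma pvHasAdj_iff (s : List Int) (hs : s.Pairwise (· ≤ ·)) :
    pvHasAdj s = true ↔ ∃ a, a ∈ s ∧ a + 1 ∈ s := by
  induction s with
  | nil => simp [pvHasAdj]
  | cons x t ih =>
    cases t with
    | nil =>
      simp only [pvHasAdj, List.tail, List.zip_nil_right, List.any_nil]
      refine ⟨fun h => by simp at h, ?_⟩
      rintro ⟨a, ha, ha1⟩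
      simp at ha ha1; omega
    | cons y u =>
      have hxy : x ≤ y := (List.pairwise_cons.mp hs).1 y (by simp)
      have hxall : ∀ z ∈ y :: u, x ≤ z := (List.pairwise_cons.mp hs).1
      have hyall : ∀ z ∈ u, y ≤ z := (List.pairwise_cons.mp (List.pairwise_cons.mp hs).2).1
      have htail := ih (List.pairwise_cons.mp hs).2
      constructor
      · intro hadj
        simp only [pvHasAdj, List.tail, List.zip_cons_cons, List.any_cons, Bool.or_eq_true,
          beq_iff_eq] at hadj
        rcases hadj with h1 | h2
        · refine ⟨x, by simp, ?_⟩
          have hxy1 : x + 1 = y := by omega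
          rw [hxy1]; simp
        · obtain ⟨a, ha, ha1⟩ := htail.mp (by simpa [pvHasAdj] using h2)
          exact ⟨a, List.mem_cons_of_mem _ ha, List.mem_cons_of_mem _ ha1⟩
      · rintro ⟨a, ha, ha1⟩
        have key : (y - x = 1) ∨ (∃ b, b ∈ y :: u ∧ b + 1 ∈ y :: u) := by
          rcases List.mem_cons.mp ha with rfl | hat
          · -- a = x; a+1 is in the tail (it cannot be x)
            have ht1 : a + 1 ∈ y :: u := by
              rcases List.mem_cons.mp ha1 with h | h
              · omega
              · exact h
            rcases List.mem_cons.mp ht1 with h | h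
            · left; omega
            · have hy1 : y ≤ a + 1 := hyall _ h
              have hay : a ≤ y := hxy
              by_cases hya : y = a
              · right; exact ⟨a, by rw [← hya]; simp, ht1⟩
              · left; omega
          · -- a in the tail; a+1 cannot be x since x ≤ a
            have hxa : x ≤ a := hxall _ hat
            have ht1 : a + 1 ∈ y :: u := by
              rcases List.mem_cons.mp ha1 with h | h
              · omega
              · exact h
            right; exact ⟨a, hat, ht1⟩
        rcases key with h1 | h2
        · simp [pvHasAdj, h1]
        · have := htail.mpr h2
          simp only [pvHasAdj, List.tail] at this ⊢
          simp only [List.zip_cons_cons, List.any_cons, Bool.or_eq_true]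
          right; exact this

-- per-city check: A's membership probes on set(l) agree with B's sorted adjacent scan on l
lemma percity_eq (l : List Int) :
    (PySem.Set.ofList l).any
        (fun n => PySem.Set.contains (PySem.Set.ofList l) (n - 1)
               || PySem.Set.contains (PySem.Set.ofList l) (n + 1))
    = pvHasAdj (PySem.List.sorted l (fun x => x) false) := by
  have hpw : (PySem.List.sorted l (fun x => x) false).Pairwise (· ≤ ·) := by
    simpa using PySem.List.sorted_pairwise l (fun x => x)
  have hmem : ∀ a : Int, a ∈ PySem.List.sorted l (fun x => x) false ↔ a ∈ l := by
    intro a; simp [PySem.List.mem_sorted]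
  rw [Bool.eq_iff_iff]
  rw [pvHasAdj_iff _ hpw]
  simp only [List.any_eq_true, Bool.or_eq_true, PySem.Set.contains_iff, PySem.Set.mem_ofList, hmem]
  constructor
  · rintro ⟨n, hn, h1 | h2⟩
    · exact ⟨n - 1, h1, by simpa using hn⟩
    · exact ⟨n, hn, h2⟩
  · rintro ⟨a, ha, ha1⟩
    exact ⟨a, ha, Or.inr ha1⟩

-- ===== VERDICT (by name: the statement is the Claim_ definition above) =====
theorem namingRoads_spec : Claim_equal_namingRoads := by
  intro roads _
  show namingRoads roads = namingRoads_alt roads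
  simp only [namingRoads, namingRoads_alt]
  rw [foldA_eq_pairs, foldB_eq_pairs]
  set dA := (pvPairs roads).foldl
      (fun d p => d.modify p.1 PySem.Set.empty (fun s => PySem.Set.add s p.2)) PySem.Dict.empty with hdA
  set dB := (pvPairs roads).foldl
      (fun d p => d.modify p.1 ([] : List Int) (fun l => l ++ [p.2])) PySem.Dict.empty with hdB
  have hkA : dA.keys = PySem.Set.ofList ((pvPairs roads).map Prod.fst) := by
    rw [hdA, PySem.Dict.keys_foldl_modify_key (pvPairs roads) Prod.fst PySem.Set.empty
      (fun _ p s => PySem.Set.add s p.2), PySem.Dict.keys_empty, PySem.Set.update_nil_left]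
  have hkB : dB.keys = PySem.Set.ofList ((pvPairs roads).map Prod.fst) := by
    rw [hdB, PySem.Dict.keys_foldl_modify_key (pvPairs roads) Prod.fst ([] : List Int)
      (fun _ p l => l ++ [p.2]), PySem.Dict.keys_empty, PySem.Set.update_nil_left]
  have hnd : dA.keys.Nodup := by rw [hkA]; exact PySem.Set.nodup_ofList _
  have hndB : dB.keys.Nodup := by rw [hkB]; exact PySem.Set.nodup_ofList _
  have hrel : ∀ c, dA.getD c PySem.Set.empty = PySem.Set.ofList (dB.getD c []) := by
    rw [hdA, hdB]
    exact getD_fold_rel (pvPairs roads) PySem.Dict.empty PySem.Dict.empty (fun c => rfl)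
  rw [PySem.Dict.values_eq_map_keys dA hnd PySem.Set.empty,
      PySem.Dict.values_eq_map_keys dB hndB ([] : List Int),
      hkA, hkB, List.any_map, List.any_map]
  congr 1
  congr 1
  funext c
  simp only [Function.comp, PySem.List.slice_from_one, hrel c]
  exact percity_eq (dB.getD c [])
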